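-- pv_equiv track=rewrite | github.com/ohlcv/my-tools | python-codebase-analyzer.py | create_dependency_matrix
-- ===== SOURCE A (Python) =====
-- from typing import List, Dict, Set, Optional, Any, Tuple, Union
--
-- def create_dependency_matrix(
--     dependencies: Dict[str, List[str]], modules: List[str]
-- ) -> List[List[str]]:
--     """创建一个依赖关系矩阵
--
--     返回一个二维数组，每个单元格包含依赖类型的符号
--     """
--     # 准备模块列表（按字母排序）
--     sorted_modules = sorted(modules)
--
--     # 创建空矩阵
--     matrix = []
--     for i in range(len(sorted_modules)):
--         row = []
--         for j in range(len(sorted_modules)):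
--             row.append(" ")
--         matrix.append(row)
--
--     # 填充矩阵
--     for i, source in enumerate(sorted_modules):
--         for j, target in enumerate(sorted_modules):
--             if i == j:
--                 matrix[i][j] = "X"  # 自引用
--             elif source in dependencies and target in dependencies[source]:
--                 matrix[i][j] = "●"  # 依赖
--
--     return matrix, sorted_modules
-- ===== SOURCE B (Python) =====
-- def create_dependency_matrix(dependencies, modules):
--     sorted_modules = sorted(modules)
--     n = len(sorted_modules)
--
--     # index table: module name -> list of its column indices in sorted_modules
--     table = {}
--     for idx, name in enumerate(sorted_modules):
--         table[name] = table.get(name, []) + [idx]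
--
--     matrix = [[" "] * n for _ in range(n)]
--
--     # walk the actual dependency edges only
--     for source, rows in table.items():
--         if source in dependencies:
--             for target in dependencies[source]:
--                 for j in table.get(target, []):
--                     for i in rows:
--                         matrix[i][j] = "●"
--
--     # diagonal last: self-reference always wins
--     for i in range(n):
--         matrix[i][i] = "X"
--
--     return matrix, sorted_modules
-- ===== Notes on version B (the rewrite author's own statement) =====
-- stated objective: alternative
-- what changed: B replaces A's cell-by-cell double scan (which re-tests membership of each target in the source's dependency list for every cell) by building a name-to-column-indices table once, marking only the actual dependency edges, and overwriting the diagonal last.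
import Mathlib
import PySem

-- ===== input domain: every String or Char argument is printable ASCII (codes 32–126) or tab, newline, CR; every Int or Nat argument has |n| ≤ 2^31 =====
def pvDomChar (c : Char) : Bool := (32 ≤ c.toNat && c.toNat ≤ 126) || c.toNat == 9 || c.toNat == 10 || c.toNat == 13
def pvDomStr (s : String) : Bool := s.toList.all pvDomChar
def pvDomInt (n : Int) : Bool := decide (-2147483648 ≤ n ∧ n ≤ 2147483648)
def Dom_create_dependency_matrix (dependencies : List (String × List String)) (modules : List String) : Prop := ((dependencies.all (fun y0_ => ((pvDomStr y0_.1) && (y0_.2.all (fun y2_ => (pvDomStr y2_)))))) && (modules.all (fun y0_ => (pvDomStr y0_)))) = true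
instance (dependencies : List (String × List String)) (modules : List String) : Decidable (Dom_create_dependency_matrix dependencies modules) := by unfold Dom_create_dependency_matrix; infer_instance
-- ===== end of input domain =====

-- B replaces A's cell-by-cell double scan with an edge-driven fill over a name-to-index table (alternative decomposition); the return value is proved equal on all inputs (neither Python mutates its arguments).

-- shared tiny helper: Python's statement `matrix[i][j] = v` (exact: PySem.List.pySetD/pyGetD)
def pvSetCell (m : List (List String)) (i j : Int) (v : String) : List (List String) :=
  PySem.List.pySetD m i (PySem.List.pySetD (PySem.List.pyGetD m i []) j v)

-- ===== PORT A =====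
def create_dependency_matrix (dependencies : List (String × List String)) (modules : List String) : List (List String) × List String :=
  let deps := PySem.Dict.mk dependencies
  let sorted_modules := PySem.List.sorted modules (fun x => x)
  -- empty matrix: nested append loops over range(len(sorted_modules))
  let matrix := (PySem.List.pyRange 0 (sorted_modules.length : Int)).foldl
    (fun matrix _ =>
      matrix ++ [(PySem.List.pyRange 0 (sorted_modules.length : Int)).foldl
        (fun row _ => row ++ [" "]) []]) []
  -- fill: double loop over enumerate(sorted_modules); `source in dependencies and target in dependencies[source]` as contains/getD
  let matrix := (PySem.List.enumerate sorted_modules).foldl (fun matrix p =>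
    (PySem.List.enumerate sorted_modules).foldl (fun matrix q =>
      if p.1 = q.1 then pvSetCell matrix p.1 q.1 "X"
      else if deps.contains p.2 && ((deps.getD p.2 []).contains q.2) then pvSetCell matrix p.1 q.1 "●"
      else matrix) matrix) matrix
  (matrix, sorted_modules)

-- ===== PORT B =====
def create_dependency_matrix_alt (dependencies : List (String × List String)) (modules : List String) : List (List String) × List String :=
  let deps := PySem.Dict.mk dependencies
  let sorted_modules := PySem.List.sorted modules (fun x => x)
  let n := sorted_modules.length
  -- table[name] = table.get(name, []) + [idx]
  let table := (PySem.List.enumerate sorted_modules).foldl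
    (fun table p => table.insert p.2 (table.getD p.2 [] ++ [p.1]))
    (PySem.Dict.empty : PySem.Dict String (List Int))
  -- [[" "]*n for _ in range(n)]
  let matrix := (List.range n).map (fun _ => PySem.List.pyRepeat [" "] (n : Int))
  -- walk the actual dependency edges only
  let matrix := table.items.foldl (fun matrix sr =>
    if deps.contains sr.1 then
      (deps.getD sr.1 []).foldl (fun matrix target =>
        (table.getD target []).foldl (fun matrix j =>
          sr.2.foldl (fun matrix i => pvSetCell matrix i j "●") matrix) matrix) matrix
    else matrix) matrix
  -- diagonal last: self-reference always wins
  let matrix := (List.range n).foldl (fun matrix (i : Nat) => pvSetCell matrix (i : Int) (i : Int) "X") matrix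
  (matrix, sorted_modules)

-- ===== PRECONDITION & SPEC =====
def Spec_create_dependency_matrix (dependencies : List (String × List String)) (modules : List String) (out : List (List String) × List String) : Prop := out = create_dependency_matrix_alt dependencies modules
instance (dependencies : List (String × List String)) (modules : List String) (out : List (List String) × List String) : Decidable (Spec_create_dependency_matrix dependencies modules out) := by unfold Spec_create_dependency_matrix; infer_instance

-- ===== CLAIM (what is proved, stated in full; the proofs are below) =====
def Claim_equal_create_dependency_matrix : Prop := ∀ (dependencies : List (String × List String)) (modules : List String), Dom_create_dependency_matrix dependencies modules → Spec_create_dependency_matrix dependencies modules (create_dependency_matrix dependencies modules)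

-- ===== LEMMAS AND PROOFS =====

-- proof-side views of the matrix writes (Nat indices)
def setN (m : List (List String)) (a b : Nat) (v : String) : List (List String) :=
  m.set a ((m.getD a []).set b v)

def cellGet (m : List (List String)) (i j : Nat) : String := (m.getD i []).getD j " "



lemma rowlen_setN (m : List (List String)) (a b : Nat) (v : String) (c : Nat) :
    ((setN m a b v).getD c []).length = (m.getD c []).length := by
  simp only [setN, List.getD_eq_getElem?_getD, List.getElem?_set]
  split_ifs <;> simp_all

lemma cell_setN (m : List (List String)) (a b : Nat) (v : String) (i j : Nat) :
    cellGet (setN m a b v) i j =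
      if a = i ∧ b = j ∧ a < m.length ∧ b < (m.getD a []).length then v
      else cellGet m i j := by
  unfold cellGet setN
  by_cases hal : a < m.length
  case neg =>
    rw [List.set_eq_of_length_le (by omega), if_neg (by tauto)]
  case pos =>
    by_cases hai : a = i
    · subst hai
      have hrow : ((m.set a ((m.getD a []).set b v)).getD a []) = (m.getD a []).set b v := by
        rw [List.getD_eq_getElem?_getD, List.getElem?_set, if_pos rfl, if_pos hal, Option.getD_some]
      rw [hrow]
      by_cases hbj : b = j
      · subst hbj
        by_cases hbl : b < (m.getD a []).length
        · rw [if_pos ⟨rfl, rfl, hal, hbl⟩,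
              List.getD_eq_getElem?_getD, List.getElem?_set, if_pos rfl, if_pos hbl, Option.getD_some]
        · rw [if_neg (by tauto),
              List.getD_eq_getElem?_getD, List.getElem?_set, if_pos rfl, if_neg hbl,
              List.getD_eq_getElem?_getD, List.getElem?_eq_none (by omega)]
      · rw [if_neg (by tauto),
            List.getD_eq_getElem?_getD, List.getElem?_set, if_neg hbj, ← List.getD_eq_getElem?_getD]
    · rw [if_neg (by tauto)]
      have h2 : ((m.set a ((m.getD a []).set b v)).getD i []) = m.getD i [] := by
        rw [List.getD_eq_getElem?_getD, List.getElem?_set, if_neg hai, ← List.getD_eq_getElem?_getD]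
      rw [h2]

lemma mem_idxs (sm : List String) (c : String) (x : Int) :
    x ∈ ((PySem.List.enumerate sm).filter (fun p => p.2 == c)).map (fun p => p.1) ↔
      ∃ k : Nat, k < sm.length ∧ x = (k : Int) ∧ sm.getD k "" = c := by
  simp only [List.mem_map, List.mem_filter, PySem.List.mem_enumerate_iff]
  constructor
  · rintro ⟨p, ⟨⟨k, hk, rfl⟩, hc⟩, rfl⟩
    refine ⟨k, hk, by simp, ?_⟩
    rw [List.getD_eq_getElem sm "" hk]
    simpa using hc
  · rintro ⟨k, hk, rfl, hc⟩
    rw [List.getD_eq_getElem sm "" hk] at hc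
    exact ⟨((k : Int), sm[k]), ⟨⟨k, hk, by simp⟩, by simpa using hc⟩, rfl⟩

def wstep (f : Int × Int → Option String) (m : List (List String)) (p : Int × Int) : List (List String) :=
  match f p with
  | some v => pvSetCell m p.1 p.2 v
  | none => m

lemma pvSetCell_natCast (m : List (List String)) (a b : Nat) (v : String) :
    pvSetCell m (a : Int) (b : Int) v = setN m a b v := by
  simp [pvSetCell, setN, PySem.List.pySetD_natCast, PySem.List.pyGetD_natCast]

lemma length_setN (m : List (List String)) (a b : Nat) (v : String) :
    (setN m a b v).length = m.length := by
  simp [setN]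

lemma wstep_eq (f : Int × Int → Option String) (m : List (List String)) (p : Int × Int)
    (h1 : 0 ≤ p.1) (h2 : 0 ≤ p.2) :
    wstep f m p = match f p with
      | some v => setN m p.1.toNat p.2.toNat v
      | none => m := by
  cases hf : f p with
  | none => simp [wstep, hf]
  | some v =>
    simp only [wstep, hf]
    rw [← pvSetCell_natCast, Int.toNat_of_nonneg h1, Int.toNat_of_nonneg h2]

lemma length_fold_wstep (f : Int × Int → Option String) (ps : List (Int × Int))
    (m : List (List String)) (hnn : ∀ p ∈ ps, 0 ≤ p.1 ∧ 0 ≤ p.2) :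
    (ps.foldl (wstep f) m).length = m.length ∧
      ∀ c : Nat, ((ps.foldl (wstep f) m).getD c []).length = (m.getD c []).length := by
  induction ps generalizing m with
  | nil => simp
  | cons p ps ih =>
    have hp := hnn p (by simp)
    have hrest : ∀ q ∈ ps, 0 ≤ q.1 ∧ 0 ≤ q.2 := fun q hq => hnn q (by simp [hq])
    simp only [List.foldl_cons, wstep_eq f m p hp.1 hp.2]
    cases hf : f p with
    | none => simpa using ih m hrest
    | some v =>
      obtain ⟨h1, h2⟩ := ih (setN m p.1.toNat p.2.toNat v) hrest
      exact ⟨by rw [h1, length_setN], fun c => by rw [h2 c, rowlen_setN]⟩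

lemma cell_fold_wstep_not_mem (f : Int × Int → Option String) (ps : List (Int × Int))
    (m : List (List String)) (i j : Nat)
    (hnn : ∀ p ∈ ps, 0 ≤ p.1 ∧ 0 ≤ p.2) (hmem : ((i : Int), (j : Int)) ∉ ps) :
    cellGet (ps.foldl (wstep f) m) i j = cellGet m i j := by
  induction ps generalizing m with
  | nil => simp
  | cons p ps ih =>
    have hp := hnn p (by simp)
    have hrest : ∀ q ∈ ps, 0 ≤ q.1 ∧ 0 ≤ q.2 := fun q hq => hnn q (by simp [hq])
    have hne : p ≠ ((i : Int), (j : Int)) := fun h => hmem (by simp [h])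
    have hrm : ((i : Int), (j : Int)) ∉ ps := fun h => hmem (by simp [h])
    simp only [List.foldl_cons, wstep_eq f m p hp.1 hp.2]
    cases hf : f p with
    | none => exact ih m hrest hrm
    | some v =>
      rw [ih _ hrest hrm, cell_setN, if_neg]
      rintro ⟨rfl, rfl, -, -⟩
      exact hne (by
        rw [Prod.ext_iff]
        exact ⟨(Int.toNat_of_nonneg hp.1).symm, (Int.toNat_of_nonneg hp.2).symm⟩)

lemma cell_setN_ne (m : List (List String)) (a b : Nat) (v : String) (i j : Nat)
    (h : ¬(a = i ∧ b = j)) : cellGet (setN m a b v) i j = cellGet m i j := by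
  rw [cell_setN, if_neg (by tauto)]

lemma cell_fold_wstep_once (f : Int × Int → Option String) (ps : List (Int × Int))
    (m : List (List String)) (i j : Nat)
    (hnn : ∀ p ∈ ps, 0 ≤ p.1 ∧ 0 ≤ p.2)
    (hcnt : ps.count ((i : Int), (j : Int)) ≤ 1) :
    cellGet (ps.foldl (wstep f) m) i j =
      if ((i : Int), (j : Int)) ∈ ps ∧ i < m.length ∧ j < (m.getD i []).length then
        (f ((i : Int), (j : Int))).getD (cellGet m i j)
      else cellGet m i j := by
  induction ps generalizing m with
  | nil => simp
  | cons p ps ih =>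
    have hp := hnn p (by simp)
    have hrest : ∀ q ∈ ps, 0 ≤ q.1 ∧ 0 ≤ q.2 := fun q hq => hnn q (by simp [hq])
    simp only [List.foldl_cons]
    by_cases hpe : p = ((i : Int), (j : Int))
    · subst hpe
      have hrm : ((i : Int), (j : Int)) ∉ ps := by
        rw [← List.count_eq_zero]
        rw [List.count_cons_self] at hcnt
        omega
      rw [cell_fold_wstep_not_mem f ps _ i j hrest hrm,
          wstep_eq f m _ hp.1 hp.2]
      cases hf : f ((i : Int), (j : Int)) with
      | none => simp
      | some v =>
        rw [cell_setN]
        by_cases hr : i < m.length ∧ j < (m.getD i []).length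
        · rw [if_pos ⟨rfl, rfl, hr.1, hr.2⟩, if_pos ⟨by simp, hr.1, hr.2⟩, Option.getD_some]
        · rw [if_neg (fun hC => hr ⟨hC.2.2.1, hC.2.2.2⟩), if_neg (fun hC => hr ⟨hC.2.1, hC.2.2⟩)]
    · have hiff : (((i : Int), (j : Int)) ∈ p :: ps) ↔ (((i : Int), (j : Int)) ∈ ps) := by
        rw [List.mem_cons]
        constructor
        · rintro (h | h)
          · exact absurd h.symm hpe
          · exact h
        · exact fun h => Or.inr h
      have hrm : ps.count ((i : Int), (j : Int)) ≤ 1 := by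
        rw [List.count_cons] at hcnt
        simpa [beq_iff_eq, hpe] using hcnt
      rw [wstep_eq f m p hp.1 hp.2]
      have hne2 : ¬(p.1.toNat = i ∧ p.2.toNat = j) := by
        rintro ⟨h1, h2⟩
        exact hpe (by
          rw [Prod.ext_iff]
          constructor
          · rw [← h1, Int.toNat_of_nonneg hp.1]
          · rw [← h2, Int.toNat_of_nonneg hp.2])
      cases hf : f p with
      | none => rw [ih m hrest hrm]; simp only [hiff]
      | some v =>
        rw [ih _ hrest hrm]
        simp only [hiff, length_setN, rowlen_setN, cell_setN_ne m p.1.toNat p.2.toNat v i j hne2]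

lemma cell_fold_wstep_const (v : String) (ps : List (Int × Int))
    (m : List (List String)) (i j : Nat)
    (hnn : ∀ p ∈ ps, 0 ≤ p.1 ∧ 0 ≤ p.2) :
    cellGet (ps.foldl (wstep (fun _ => some v)) m) i j =
      if ((i : Int), (j : Int)) ∈ ps ∧ i < m.length ∧ j < (m.getD i []).length then v
      else cellGet m i j := by
  induction ps generalizing m with
  | nil => simp
  | cons p ps ih =>
    have hp := hnn p (by simp)
    have hrest : ∀ q ∈ ps, 0 ≤ q.1 ∧ 0 ≤ q.2 := fun q hq => hnn q (by simp [hq])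
    simp only [List.foldl_cons, wstep_eq (fun _ => some v) m p hp.1 hp.2]
    rw [ih (setN m p.1.toNat p.2.toNat v) hrest]
    by_cases hpe : p = ((i : Int), (j : Int))
    · subst hpe
      rw [length_setN, rowlen_setN, cell_setN]
      by_cases hr : i < m.length ∧ j < (m.getD i []).length
      · by_cases hm : ((i : Int), (j : Int)) ∈ ps
        · rw [if_pos ⟨hm, hr.1, hr.2⟩, if_pos ⟨by simp, hr.1, hr.2⟩]
        · rw [if_neg (fun hC => hm hC.1), if_pos ⟨rfl, rfl, hr.1, hr.2⟩,
              if_pos ⟨by simp, hr.1, hr.2⟩]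
      · rw [if_neg (fun hC => hr ⟨hC.2.1, hC.2.2⟩),
            if_neg (fun hC => hr ⟨hC.2.2.1, hC.2.2.2⟩),
            if_neg (fun hC => hr ⟨hC.2.1, hC.2.2⟩)]
    · have hiff : (((i : Int), (j : Int)) ∈ p :: ps) ↔ (((i : Int), (j : Int)) ∈ ps) := by
        rw [List.mem_cons]
        constructor
        · rintro (h | h)
          · exact absurd h.symm hpe
          · exact h
        · exact fun h => Or.inr h
      have hne2 : ¬(p.1.toNat = i ∧ p.2.toNat = j) := by
        rintro ⟨h1, h2⟩
        exact hpe (by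
          rw [Prod.ext_iff]
          constructor
          · rw [← h1, Int.toNat_of_nonneg hp.1]
          · rw [← h2, Int.toNat_of_nonneg hp.2])
      rw [length_setN, rowlen_setN, cell_setN_ne m p.1.toNat p.2.toNat v i j hne2]
      simp only [hiff]

-- the dependency test both programs make, as a function of the indices
def condI (D : PySem.Dict String (List String)) (sm : List String) (x y : Int) : Bool :=
  D.contains (PySem.List.pyGetD sm x "") &&
    ((D.getD (PySem.List.pyGetD sm x "") []).contains (PySem.List.pyGetD sm y ""))

-- the column indices of name c in sm
def idxs (sm : List String) (c : String) : List Int :=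
  ((PySem.List.enumerate sm).filter (fun p => p.2 == c)).map (fun p => p.1)

-- per-cell write function of program A
def fA (D : PySem.Dict String (List String)) (sm : List String) : Int × Int → Option String :=
  fun p => if p.1 = p.2 then some "X" else if condI D sm p.1 p.2 then some "●" else none

def mat0 (n : Nat) : List (List String) := List.replicate n (List.replicate n " ")

def psA (n : Nat) : List (Int × Int) :=
  (PySem.List.pyRange 0 (n : Int)) ×ˢ (PySem.List.pyRange 0 (n : Int))


lemma hsnd_enum (sm : List String) :
    ∀ p ∈ PySem.List.enumerate sm, p.2 = PySem.List.pyGetD sm p.1 "" := by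
  intro p hp
  obtain ⟨k, hk, rfl⟩ := (PySem.List.mem_enumerate_iff sm 0 p).mp hp
  simp [PySem.List.pyGetD_natCast, List.getD_eq_getElem?_getD, List.getElem?_eq_getElem hk]

lemma stepA_eq (D : PySem.Dict String (List String)) (sm : List String)
    (m : List (List String)) (x y : Int) :
    (if x = y then pvSetCell m x y "X"
     else if D.contains (PySem.List.pyGetD sm x "") &&
         ((D.getD (PySem.List.pyGetD sm x "") []).contains (PySem.List.pyGetD sm y "")) then
       pvSetCell m x y "●"
     else m) = wstep (fA D sm) m (x, y) := by
  unfold wstep fA condI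
  split_ifs <;> rfl

lemma mat0A (n : Nat) :
    (PySem.List.pyRange 0 (n : Int)).foldl
      (fun matrix _ =>
        matrix ++ [(PySem.List.pyRange 0 (n : Int)).foldl (fun row _ => row ++ [" "]) []]) []
      = mat0 n := by
  have hrow : (PySem.List.pyRange 0 (n : Int)).foldl (fun row _ => row ++ [" "]) ([] : List String)
      = List.replicate n " " := by
    rw [PySem.List.foldl_append_singleton_eq_map (fun _ => " ")]
    simp [PySem.List.pyRange_zero_natCast, Function.comp_def, List.map_const']
  rw [PySem.List.foldl_append_singleton_eq_map
    (fun _ => (PySem.List.pyRange 0 (n : Int)).foldl (fun row _ => row ++ [" "]) []), hrow]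
  simp [mat0, PySem.List.pyRange_zero_natCast, Function.comp_def, List.map_const']

lemma A_eq (dependencies : List (String × List String)) (modules : List String) :
    create_dependency_matrix dependencies modules =
      ((psA (PySem.List.sorted modules (fun x => x)).length).foldl
        (wstep (fA (PySem.Dict.mk dependencies) (PySem.List.sorted modules (fun x => x))))
        (mat0 (PySem.List.sorted modules (fun x => x)).length),
       PySem.List.sorted modules (fun x => x)) := by
  unfold create_dependency_matrix
  set D := PySem.Dict.mk dependencies with hD
  set sm := PySem.List.sorted modules (fun x => x) with hsm
  set n := sm.length with hn
  refine Prod.ext ?_ rfl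
  show (PySem.List.enumerate sm).foldl _ _ = _
  rw [mat0A]
  -- replace the loop bodies: source/target are positional lookups, then drop the snd components
  have hcong : ∀ (m : List (List String)),
      (PySem.List.enumerate sm).foldl (fun matrix p =>
        (PySem.List.enumerate sm).foldl (fun matrix q =>
          if p.1 = q.1 then pvSetCell matrix p.1 q.1 "X"
          else if D.contains p.2 && ((D.getD p.2 []).contains q.2) then pvSetCell matrix p.1 q.1 "●"
          else matrix) matrix) m
      = (PySem.List.enumerate sm).foldl (fun matrix p =>
          (PySem.List.enumerate sm).foldl (fun matrix q =>
            wstep (fA D sm) matrix (p.1, q.1)) matrix) m := by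
    intro m
    refine PySem.List.foldl_congr_mem _ _ _ _ ?_
    intro acc p hp
    refine PySem.List.foldl_congr_mem _ _ _ _ ?_
    intro acc2 q hq
    rw [hsnd_enum sm p hp, hsnd_enum sm q hq, stepA_eq]
  rw [hcong]
  -- a body depending only on the indices: fold over pyRange instead of enumerate
  have hfst : ∀ (g : List (List String) → Int → List (List String)) (m : List (List String)),
      (PySem.List.enumerate sm).foldl (fun matrix p => g matrix p.1) m
        = (PySem.List.pyRange 0 (n : Int)).foldl g m := by
    intro g m
    have hR : PySem.List.pyRange 0 (n : Int) = (PySem.List.enumerate sm).map (fun p => p.1) := by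
      rw [PySem.List.map_fst_enumerate, hn]
      norm_num
    rw [hR, List.foldl_map]
  rw [hfst (fun matrix x => (PySem.List.enumerate sm).foldl
        (fun matrix q => wstep (fA D sm) matrix (x, q.1)) matrix)]
  have hinner : (fun (matrix : List (List String)) (x : Int) =>
      (PySem.List.enumerate sm).foldl (fun matrix q => wstep (fA D sm) matrix (x, q.1)) matrix)
      = (fun matrix x =>
      (PySem.List.pyRange 0 (n : Int)).foldl (fun matrix y => wstep (fA D sm) matrix (x, y)) matrix) := by
    funext matrix x
    exact hfst (fun m y => wstep (fA D sm) m (x, y)) matrix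
  rw [hinner]
  rw [show psA n = (PySem.List.pyRange 0 (n : Int)).flatMap
        (fun a => (PySem.List.pyRange 0 (n : Int)).map (Prod.mk a)) from rfl,
      List.foldl_flatMap]
  simp only [List.foldl_map]
  rfl



-- B's index table
def tbl (sm : List String) : PySem.Dict String (List Int) :=
  (PySem.List.enumerate sm).foldl
    (fun table p => table.insert p.2 (table.getD p.2 [] ++ [p.1])) PySem.Dict.empty

-- B's write list for one source name
def eB (D : PySem.Dict String (List String)) (sm : List String) (s : String) : List (Int × Int) :=
  if D.contains s then
    (D.getD s []).flatMap (fun t => (idxs sm t).flatMap (fun jj => (idxs sm s).map (fun ii => (ii, jj))))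
  else []

def pdiag (n : Nat) : List (Int × Int) := (List.range n).map (fun (k : Nat) => ((k : Int), (k : Int)))

lemma tbl_getD (sm : List String) (c : String) : (tbl sm).getD c [] = idxs sm c := by
  unfold tbl idxs
  have h1 : (PySem.List.enumerate sm).foldl
      (fun d p => d.insert p.2 (d.getD p.2 [] ++ [p.1])) PySem.Dict.empty
      = ((PySem.List.enumerate sm).map (fun p => (p.2, p.1))).foldl
          (fun d q => d.modify q.1 [] (fun x => x ++ [q.2])) PySem.Dict.empty := by
    rw [List.foldl_map]
    rfl
  rw [h1, PySem.Dict.getD_foldl_modify_append, List.filter_map, List.map_map]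
  simp [Function.comp_def]

lemma tbl_nodup (sm : List String) : (tbl sm).keys.Nodup :=
  PySem.Dict.nodup_keys_foldl_insert_key (PySem.List.enumerate sm) (fun p => p.2)
    (fun d p => d.getD p.2 [] ++ [p.1]) PySem.Dict.empty (by simp)

lemma tbl_items_sound (sm : List String) {s : String} {rows : List Int}
    (h : (s, rows) ∈ (tbl sm).items) : rows = idxs sm s := by
  have hg := PySem.Dict.get?_of_mem_items _ h (tbl_nodup sm)
  have h2 := PySem.Dict.getD_eq_get?_getD (tbl sm) s []
  rw [hg, tbl_getD] at h2
  simpa using h2.symm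

lemma tbl_items_complete (sm : List String) (i : Nat) (hi : i < sm.length) :
    (sm.getD i "", idxs sm (sm.getD i "")) ∈ (tbl sm).items := by
  have hmem : ((i : Int)) ∈ idxs sm (sm.getD i "") := (mem_idxs _ _ _).mpr ⟨i, hi, rfl, rfl⟩
  cases hg : (tbl sm).get? (sm.getD i "") with
  | none =>
    have h2 := PySem.Dict.getD_eq_get?_getD (tbl sm) (sm.getD i "") []
    rw [hg, tbl_getD, Option.getD_none] at h2
    rw [h2] at hmem
    cases hmem
  | some w =>
    have h2 := PySem.Dict.getD_eq_get?_getD (tbl sm) (sm.getD i "") []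
    rw [hg, tbl_getD, Option.getD_some] at h2
    rw [h2]
    exact PySem.Dict.mem_items_of_get?_eq_some _ hg

lemma B_eq (dependencies : List (String × List String)) (modules : List String) :
    create_dependency_matrix_alt dependencies modules =
      ((pdiag (PySem.List.sorted modules (fun x => x)).length).foldl
         (wstep (fun _ => some "X"))
         (((tbl (PySem.List.sorted modules (fun x => x))).items.flatMap
             (fun sr => eB (PySem.Dict.mk dependencies) (PySem.List.sorted modules (fun x => x)) sr.1)).foldl
           (wstep (fun _ => some "●"))
           (mat0 (PySem.List.sorted modules (fun x => x)).length)),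
       PySem.List.sorted modules (fun x => x)) := by
  unfold create_dependency_matrix_alt
  simp only []
  set D := PySem.Dict.mk dependencies with hD
  set sm := PySem.List.sorted modules (fun x => x) with hsm
  set n := sm.length with hn
  refine Prod.ext ?_ rfl
  rw [show (List.foldl (fun (table : PySem.Dict String (List Int)) p =>
        table.insert p.2 (table.getD p.2 [] ++ [p.1])) PySem.Dict.empty
        (PySem.List.enumerate sm)) = tbl sm from rfl]
  have hm0 : (List.range n).map (fun _ => PySem.List.pyRepeat [" "] (n : Int)) = mat0 n := by
    simp [PySem.List.pyRepeat_singleton, mat0, List.map_const']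
  have hdiag : ∀ m : List (List String),
      (List.range n).foldl (fun matrix (i : Nat) => pvSetCell matrix (i : Int) (i : Int) "X") m
        = (pdiag n).foldl (wstep (fun _ => some "X")) m := by
    intro m
    rw [show pdiag n = (List.range n).map (fun (k : Nat) => ((k : Int), (k : Int))) from rfl, List.foldl_map]
    rfl
  rw [← hdiag]
  have hedge :
      (tbl sm).items.foldl (fun matrix sr =>
        if D.contains sr.1 then
          (D.getD sr.1 []).foldl (fun matrix target =>
            ((tbl sm).getD target []).foldl (fun matrix j =>
              sr.2.foldl (fun matrix i => pvSetCell matrix i j "●") matrix) matrix) matrix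
        else matrix) (mat0 n)
      = ((tbl sm).items.flatMap (fun sr => eB D sm sr.1)).foldl
          (wstep (fun _ => some "●")) (mat0 n) := by
    rw [List.foldl_flatMap]
    refine PySem.List.foldl_congr_mem _ _ _ _ ?_
    intro acc sr hsr
    have hrows : sr.2 = idxs sm sr.1 := tbl_items_sound sm (by
      have : (sr.1, sr.2) ∈ (tbl sm).items := by simpa using hsr
      exact this)
    unfold eB
    by_cases hc : D.contains sr.1
    · rw [if_pos hc, if_pos hc, List.foldl_flatMap]
      refine PySem.List.foldl_congr_mem _ _ _ _ ?_
      intro acc2 t _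
      rw [List.foldl_flatMap, tbl_getD]
      refine PySem.List.foldl_congr_mem _ _ _ _ ?_
      intro acc3 jj _
      rw [List.foldl_map, hrows]
      rfl
    · rw [if_neg hc, if_neg hc]
      simp
  rw [hm0, hedge, hdiag]



lemma mem_pyRange_zero_iff (n k : Nat) : ((k : Int) ∈ PySem.List.pyRange 0 (n : Int)) ↔ k < n := by
  rw [PySem.List.mem_pyRange_one]
  omega

lemma nodup_pyRange_zero (n : Nat) : (PySem.List.pyRange 0 (n : Int)).Nodup := by
  rw [PySem.List.pyRange_zero_natCast]
  exact List.Nodup.map (fun a b h => by exact_mod_cast h) (List.nodup_range)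

lemma hnn_psA (n : Nat) : ∀ p ∈ psA n, 0 ≤ p.1 ∧ 0 ≤ p.2 := by
  rintro ⟨x, y⟩ hp
  obtain ⟨hx, hy⟩ := List.pair_mem_product.mp hp
  exact ⟨(PySem.List.mem_pyRange_one.mp hx).1, (PySem.List.mem_pyRange_one.mp hy).1⟩

lemma hnn_pdiag (n : Nat) : ∀ p ∈ pdiag n, 0 ≤ p.1 ∧ 0 ≤ p.2 := by
  intro p hp
  obtain ⟨k, -, rfl⟩ := List.mem_map.mp hp
  simp

lemma nonneg_of_mem_idxs (sm : List String) (c : String) (x : Int) (h : x ∈ idxs sm c) : 0 ≤ x := by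
  obtain ⟨k, -, rfl, -⟩ := (mem_idxs sm c x).mp h
  simp

lemma hnn_P (D : PySem.Dict String (List String)) (sm : List String) :
    ∀ p ∈ (tbl sm).items.flatMap (fun sr => eB D sm sr.1), 0 ≤ p.1 ∧ 0 ≤ p.2 := by
  intro p hp
  obtain ⟨sr, -, hpe⟩ := List.mem_flatMap.mp hp
  unfold eB at hpe
  by_cases hc : D.contains sr.1
  · rw [if_pos hc] at hpe
    obtain ⟨t, -, hpe⟩ := List.mem_flatMap.mp hpe
    obtain ⟨jj, hjj, hpe⟩ := List.mem_flatMap.mp hpe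
    obtain ⟨ii, hii, rfl⟩ := List.mem_map.mp hpe
    exact ⟨nonneg_of_mem_idxs sm sr.1 ii hii, nonneg_of_mem_idxs sm t jj hjj⟩
  · rw [if_neg hc] at hpe
    cases hpe

lemma mem_pdiag_iff (n : Nat) (i j : Nat) :
    (((i : Int), (j : Int)) ∈ pdiag n) ↔ i = j ∧ i < n := by
  unfold pdiag
  rw [List.mem_map]
  constructor
  · rintro ⟨k, hk, heq⟩
    obtain ⟨h1, h2⟩ := Prod.mk.injEq .. ▸ heq
    have hk1 : k = i := by exact_mod_cast h1
    have hk2 : k = j := by exact_mod_cast h2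
    exact ⟨hk1 ▸ hk2 ▸ rfl, hk1 ▸ List.mem_range.mp hk⟩
  · rintro ⟨rfl, hi⟩
    exact ⟨i, List.mem_range.mpr hi, rfl⟩

lemma memP_iff (D : PySem.Dict String (List String)) (sm : List String) (i j : Nat)
    (hi : i < sm.length) (hj : j < sm.length) :
    (((i : Int), (j : Int)) ∈ (tbl sm).items.flatMap (fun sr => eB D sm sr.1)) ↔
      condI D sm (i : Int) (j : Int) = true := by
  have hgi : PySem.List.pyGetD sm (i : Int) "" = sm.getD i "" := PySem.List.pyGetD_natCast sm i ""
  have hgj : PySem.List.pyGetD sm (j : Int) "" = sm.getD j "" := PySem.List.pyGetD_natCast sm j ""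
  constructor
  · intro hp
    obtain ⟨sr, hsr, hpe⟩ := List.mem_flatMap.mp hp
    unfold eB at hpe
    by_cases hc : D.contains sr.1
    · rw [if_pos hc] at hpe
      obtain ⟨t, ht, hpe⟩ := List.mem_flatMap.mp hpe
      obtain ⟨jj, hjj, hpe⟩ := List.mem_flatMap.mp hpe
      obtain ⟨ii, hii, heq⟩ := List.mem_map.mp hpe
      obtain ⟨h1, h2⟩ := Prod.mk.injEq .. ▸ heq
      subst h1; subst h2
      obtain ⟨k, hk, hki, hks⟩ := (mem_idxs sm sr.1 _).mp hii
      have hki' : k = i := by exact_mod_cast hki.symm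
      subst hki'
      obtain ⟨l, hl, hlj, hlt⟩ := (mem_idxs sm t _).mp hjj
      have hlj' : l = j := by exact_mod_cast hlj.symm
      subst hlj'
      unfold condI
      rw [hgi, hgj, hks, hlt]
      rw [Bool.and_eq_true]
      exact ⟨hc, List.contains_iff_mem.mpr (hlt ▸ ht)⟩
    · rw [if_neg hc] at hpe
      cases hpe
  · intro hcond
    unfold condI at hcond
    rw [hgi, hgj, Bool.and_eq_true] at hcond
    obtain ⟨hc1, hc2⟩ := hcond
    refine List.mem_flatMap.mpr ⟨(sm.getD i "", idxs sm (sm.getD i "")),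
      tbl_items_complete sm i hi, ?_⟩
    unfold eB
    rw [if_pos hc1]
    refine List.mem_flatMap.mpr ⟨sm.getD j "", List.contains_iff_mem.mp hc2, ?_⟩
    refine List.mem_flatMap.mpr ⟨(j : Int), (mem_idxs sm _ _).mpr ⟨j, hj, rfl, rfl⟩, ?_⟩
    exact List.mem_map.mpr ⟨(i : Int), (mem_idxs sm _ _).mpr ⟨i, hi, rfl, rfl⟩, rfl⟩

lemma mat0_length (n : Nat) : (mat0 n).length = n := by simp [mat0]

lemma mat0_row (n c : Nat) (hc : c < n) : (mat0 n).getD c [] = List.replicate n " " := by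
  rw [mat0, List.getD_eq_getElem _ _ (by simpa using hc)]
  simp

lemma mat0_rowlen (n c : Nat) (hc : c < n) : ((mat0 n).getD c []).length = n := by
  rw [mat0_row n c hc]; simp

lemma mat0_cell (n i j : Nat) : cellGet (mat0 n) i j = " " := by
  unfold cellGet
  rcases Nat.lt_or_ge i n with hi | hi
  · rw [mat0_row n i hi]
    rcases Nat.lt_or_ge j n with hj | hj
    · rw [List.getD_eq_getElem _ _ (by simpa using hj)]
      simp
    · rw [List.getD_eq_getElem?_getD, List.getElem?_eq_none (by simpa using hj)]
      rfl
  · have h0 : (mat0 n).getD i [] = [] := by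
      rw [mat0, List.getD_eq_getElem?_getD, List.getElem?_eq_none (by simpa using hi)]
      rfl
    rw [h0]
    rfl

lemma cellA_char (D : PySem.Dict String (List String)) (sm : List String) (i j : Nat)
    (hi : i < sm.length) (hj : j < sm.length) :
    cellGet ((psA sm.length).foldl (wstep (fA D sm)) (mat0 sm.length)) i j =
      if i = j then "X" else if condI D sm (i : Int) (j : Int) then "●" else " " := by
  have hnd : (psA sm.length).Nodup :=
    List.Nodup.product (nodup_pyRange_zero sm.length) (nodup_pyRange_zero sm.length)
  have hcnt := List.nodup_iff_count_le_one.mp hnd (((i : Int), (j : Int)))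
  rw [cell_fold_wstep_once (fA D sm) (psA sm.length) (mat0 sm.length) i j (hnn_psA sm.length) hcnt]
  have hmem : (((i : Int), (j : Int)) ∈ psA sm.length) :=
    List.pair_mem_product.mpr ⟨(mem_pyRange_zero_iff _ _).mpr hi, (mem_pyRange_zero_iff _ _).mpr hj⟩
  rw [if_pos ⟨hmem, by rw [mat0_length]; exact hi, by rw [mat0_rowlen _ _ hi]; exact hj⟩,
      mat0_cell]
  unfold fA
  by_cases hij : i = j
  · rw [if_pos (show ((i : Int), (j : Int)).1 = ((i : Int), (j : Int)).2 by
        show (i : Int) = (j : Int); exact_mod_cast hij), if_pos hij]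
    rfl
  · rw [if_neg (show ¬((i : Int), (j : Int)).1 = ((i : Int), (j : Int)).2 by
        show ¬((i : Int) = (j : Int)); exact_mod_cast hij), if_neg hij]
    by_cases hcond : condI D sm (i : Int) (j : Int)
    · rw [if_pos hcond, if_pos hcond]
      rfl
    · rw [if_neg hcond, if_neg hcond]
      rfl


lemma cellB_char (D : PySem.Dict String (List String)) (sm : List String) (i j : Nat)
    (hi : i < sm.length) (hj : j < sm.length) :
    cellGet ((pdiag sm.length).foldl (wstep (fun _ => some "X"))
      (((tbl sm).items.flatMap (fun sr => eB D sm sr.1)).foldl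
        (wstep (fun _ => some "●")) (mat0 sm.length))) i j =
      if i = j then "X" else if condI D sm (i : Int) (j : Int) then "●" else " " := by
  set n := sm.length with hn
  set P := (tbl sm).items.flatMap (fun sr => eB D sm sr.1) with hP
  set M1 := P.foldl (wstep (fun _ => some "●")) (mat0 n) with hM1
  have hpres := length_fold_wstep (fun _ => some "●") P (mat0 n) (by rw [hP]; exact hnn_P D sm)
  rw [← hM1] at hpres
  have hlen1 : M1.length = n := by rw [hpres.1, mat0_length]
  have hrowlen1 : (M1.getD i []).length = n := by rw [hpres.2 i, mat0_rowlen n i hi]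
  have hc1 : cellGet M1 i j =
      if (((i : Int), (j : Int)) ∈ P ∧ i < (mat0 n).length ∧ j < ((mat0 n).getD i []).length)
      then "●" else cellGet (mat0 n) i j := by
    rw [hM1]
    exact cell_fold_wstep_const "●" P (mat0 n) i j (by rw [hP]; exact hnn_P D sm)
  rw [cell_fold_wstep_const "X" (pdiag n) M1 i j (hnn_pdiag n), hc1, mat0_cell,
      mat0_length, mat0_rowlen n i hi, hlen1, hrowlen1]
  simp only [hP, mem_pdiag_iff n i j, memP_iff D sm i j hi hj]
  split_ifs <;> tauto

-- ===== VERDICT (by name: the statement is the Claim_ definition above) =====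
theorem create_dependency_matrix_spec : Claim_equal_create_dependency_matrix := by
  intro dependencies modules _
  unfold Spec_create_dependency_matrix
  rw [A_eq, B_eq]
  set D := PySem.Dict.mk dependencies with hD
  set sm := PySem.List.sorted modules (fun x => x) with hsm
  set n := sm.length with hn
  refine Prod.ext ?_ rfl
  show (psA n).foldl (wstep (fA D sm)) (mat0 n) = _
  set MA := (psA n).foldl (wstep (fA D sm)) (mat0 n) with hMA
  set P := (tbl sm).items.flatMap (fun sr => eB D sm sr.1) with hP
  set MB := (pdiag n).foldl (wstep (fun _ => some "X"))
      (P.foldl (wstep (fun _ => some "●")) (mat0 n)) with hMB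
  have hApres := length_fold_wstep (fA D sm) (psA n) (mat0 n) (hnn_psA n)
  rw [← hMA] at hApres
  have hBpres1 := length_fold_wstep (fun _ => some "●") P (mat0 n) (by rw [hP]; exact hnn_P D sm)
  have hBpres := length_fold_wstep (fun _ => some "X") (pdiag n)
      (P.foldl (wstep (fun _ => some "●")) (mat0 n)) (hnn_pdiag n)
  rw [← hMB] at hBpres
  have hAlen : MA.length = n := by rw [hApres.1, mat0_length]
  have hBlen : MB.length = n := by rw [hBpres.1, hBpres1.1, mat0_length]
  have hArow : ∀ c, c < n → (MA.getD c []).length = n := fun c hc => by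
    rw [hApres.2 c, mat0_rowlen n c hc]
  have hBrow : ∀ c, c < n → (MB.getD c []).length = n := fun c hc => by
    rw [hBpres.2 c, hBpres1.2 c, mat0_rowlen n c hc]
  have hcells : ∀ i j : Nat, i < n → j < n → cellGet MA i j = cellGet MB i j := by
    intro i j hi hj
    rw [hMA, hMB, hP, cellA_char D sm i j hi hj, cellB_char D sm i j hi hj]
  apply List.ext_getElem (by rw [hAlen, hBlen])
  intro i h1 h2
  have hin : i < n := by rwa [hAlen] at h1
  have hgA : MA.getD i [] = MA[i] := List.getD_eq_getElem MA [] h1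
  have hgB : MB.getD i [] = MB[i] := List.getD_eq_getElem MB [] h2
  apply List.ext_getElem (by rw [← hgA, ← hgB, hArow i hin, hBrow i hin])
  intro j hj1 hj2
  have hjn : j < n := by
    rw [← hgA] at hj1
    rwa [hArow i hin] at hj1
  have hcell := hcells i j hin hjn
  have eA : cellGet MA i j = MA[i][j] := by
    unfold cellGet
    rw [hgA, List.getD_eq_getElem _ _ hj1]
  have eB' : cellGet MB i j = MB[i][j] := by
    unfold cellGet
    rw [hgB, List.getD_eq_getElem _ _ hj2]
  rw [← eA, ← eB']
  exact hcell
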